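-- pv_equiv track=rewrite | github.com/linkeLi0421/auto-bug-migration | script/react_agent/tools/ossfuzz_tools.py | _extract_diff_block_for_line
-- ===== SOURCE A (Python) =====
-- def _extract_diff_block_for_line(patch_text: str, line_no: int) -> str:
--     """Return the `diff --git` block that contains `line_no` (1-based)."""
--     lines = str(patch_text or "").splitlines()
--     if not lines:
--         return ""
--     n = int(line_no or 0)
--     if n <= 0:
--         return ""
--     if n > len(lines):
--         n = len(lines)
--
--     start = -1
--     for i in range(n - 1, -1, -1):
--         if str(lines[i] or "").startswith("diff --git "):
--             start = i
--             break
--     if start < 0: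
--         return ""
--
--     end = len(lines)
--     for j in range(start + 1, len(lines)):
--         if str(lines[j] or "").startswith("diff --git "):
--             end = j
--             break
--
--     block = lines[start:end]
--     if not block:
--         return ""
--     return "\n".join(block).rstrip("\n") + "\n"
-- ===== SOURCE B (Python) =====
-- def _extract_diff_block_for_line(patch_text: str, line_no: int) -> str:
--     """Single forward pass: track the last 'diff --git' header at or before
--     line_no and the first header after it, then slice once."""
--     lines = str(patch_text or "").splitlines()
--     if not lines:
--         return ""
--     n = int(line_no or 0)
--     if n <= 0:
--         return ""
--     n = min(n, len(lines))
--     start = -1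
--     end = len(lines)
--     for i, line in enumerate(lines):
--         if str(line or "").startswith("diff --git "):
--             if i <= n - 1:
--                 start = i
--             else:
--                 end = i
--                 break
--     if start < 0:
--         return ""
--     return "\n".join(lines[start:end]).rstrip("\n") + "\n"
-- ===== Notes on version B (the rewrite author's own statement) =====
-- stated objective: alternative
-- what changed: B makes one forward pass with enumerate, tracking the last 'diff --git' header at or before the requested line and the first header after it, instead of A's backward scan for the block start followed by a second forward scan for the block end.
import Mathlib
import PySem

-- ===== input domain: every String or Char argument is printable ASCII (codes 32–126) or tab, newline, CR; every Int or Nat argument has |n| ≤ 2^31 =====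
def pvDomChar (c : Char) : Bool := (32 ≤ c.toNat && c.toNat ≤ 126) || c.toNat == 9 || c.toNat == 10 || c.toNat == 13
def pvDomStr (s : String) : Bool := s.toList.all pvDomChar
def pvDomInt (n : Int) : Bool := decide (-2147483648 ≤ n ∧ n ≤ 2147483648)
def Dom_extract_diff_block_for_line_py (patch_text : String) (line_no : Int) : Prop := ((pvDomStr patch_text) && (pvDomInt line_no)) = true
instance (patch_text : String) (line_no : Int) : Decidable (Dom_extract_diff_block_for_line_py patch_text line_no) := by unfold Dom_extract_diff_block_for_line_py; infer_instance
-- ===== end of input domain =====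

-- B replaces A's backward-then-forward pair of scans by ONE forward pass that tracks the last
-- 'diff --git ' header at or before the requested line and the first header after it (objective: alternative).

-- shared primitives of both ports
-- 'l.startswith("diff --git ")' (Python applies it to 'str(l or "")', identity on str)
def pvIsDiff (l : String) : Bool := PySem.Str.startswith l "diff --git "
-- exact port of Python str.rstrip("\n"): drop trailing '\n' code points
def pvRstripNl (cs : List Char) : List Char := (cs.reverse.dropWhile (fun c => c == '\n')).reverse

-- ===== PORT A =====
-- 'str(patch_text or "")' and 'int(line_no or 0)' are identities on str/int and are dropped.
def extract_diff_block_for_line_py (patch_text : String) (line_no : Int) : String :=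
  let lines := PySem.Str.splitlines patch_text
  if lines = [] then ""
  else
    let n0 := line_no
    if n0 ≤ 0 then ""
    else
      let n : Int := if n0 > (lines.length : Int) then (lines.length : Int) else n0
      -- for i in range(n-1, -1, -1): first hit wins (break)
      let start : Int :=
        (PySem.List.pyRange (n - 1) (-1) (-1)).foldl
          (fun acc i =>
            if 0 ≤ acc then acc
            else if pvIsDiff (PySem.List.pyGetD lines i "") then i else acc)
          (-1)
      if start < 0 then ""
      else
        -- for j in range(start+1, len(lines)): first hit wins (break)
        let endIdx : Int :=
          (PySem.List.pyRange (start + 1) (lines.length : Int) 1).foldl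
            (fun acc j =>
              if acc < (lines.length : Int) then acc
              else if pvIsDiff (PySem.List.pyGetD lines j "") then j else acc)
            (lines.length : Int)
        let block := PySem.List.slice lines (some start) (some endIdx)
        if block = [] then ""
        else String.ofList (pvRstripNl (PySem.Str.join "\n" block).toList ++ ['\n'])

-- ===== PORT B =====
-- single forward pass over enumerate(lines); the Python 'break' is the Bool 'done' component
def extract_diff_block_for_line_py_alt (patch_text : String) (line_no : Int) : String :=
  let lines := PySem.Str.splitlines patch_text
  if lines = [] then ""
  else if line_no ≤ 0 then ""
  else
    let n : Int := min line_no (lines.length : Int)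
    let res :=
      (PySem.List.enumerate lines 0).foldl
        (fun (st : Int × Int × Bool) p =>
          if st.2.2 then st
          else if pvIsDiff p.2 then
            (if p.1 ≤ n - 1 then (p.1, st.2.1, false) else (st.1, p.1, true))
          else st)
        (-1, (lines.length : Int), false)
    if res.1 < 0 then ""
    else String.ofList (pvRstripNl (PySem.Str.join "\n"
      (PySem.List.slice lines (some res.1) (some res.2.1))).toList ++ ['\n'])

-- ===== PRECONDITION & SPEC =====
def Spec_extract_diff_block_for_line_py (patch_text : String) (line_no : Int) (out : String) : Prop := out = extract_diff_block_for_line_py_alt patch_text line_no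
instance (patch_text : String) (line_no : Int) (out : String) : Decidable (Spec_extract_diff_block_for_line_py patch_text line_no out) := by unfold Spec_extract_diff_block_for_line_py; infer_instance

-- ===== CLAIM (what is proved, stated in full; the proofs are below) =====
def Claim_equal_extract_diff_block_for_line_py : Prop := ∀ (patch_text : String) (line_no : Int), Dom_extract_diff_block_for_line_py patch_text line_no → Spec_extract_diff_block_for_line_py patch_text line_no (extract_diff_block_for_line_py patch_text line_no)

-- ===== LEMMAS AND PROOFS =====

-- last index i < m (position i counted from base) with pvIsDiff, default s: B's 'start' accumulator
def pvLastIdx (m : Nat) : Int → Nat → List String → Int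
  | s, _, [] => s
  | s, i, x :: t => pvLastIdx m (if i < m ∧ pvIsDiff x then (i : Int) else s) (i + 1) t

-- first index ≥ m with pvIsDiff, default e: B's 'end' accumulator
def pvFirstIdx (m : Nat) : Int → Nat → List String → Int
  | e, _, [] => e
  | e, i, x :: t => if m ≤ i ∧ pvIsDiff x then (i : Int) else pvFirstIdx m e (i + 1) t

-- B's 'done' flag
def pvDoneF (m : Nat) : Nat → List String → Bool
  | _, [] => false
  | i, x :: t => if m ≤ i ∧ pvIsDiff x then true else pvDoneF m (i + 1) t

-- first index ≥ t with pvIsDiff via findIdx?, default e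
def pvFF (xs : List String) (t : Nat) (e : Int) : Int :=
  match (xs.drop t).findIdx? pvIsDiff with
  | some k => ((t + k : Nat) : Int)
  | none => e

theorem pvLastIdx_frozen (m : Nat) (xs : List String) : ∀ (i : Nat) (s : Int), m ≤ i → pvLastIdx m s i xs = s := by
  induction xs with
  | nil => intro i s h; rfl
  | cons x t ih =>
      intro i s h
      simp only [pvLastIdx]
      rw [if_neg (by omega : ¬(i < m ∧ pvIsDiff x = true)), ih (i+1) s (by omega)]

theorem pvLastIdx_cases (m : Nat) (xs : List String) : ∀ (i : Nat) (s : Int), pvLastIdx m s i xs = s ∨ (i : Int) ≤ pvLastIdx m s i xs := by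
  induction xs with
  | nil => intro i s; left; rfl
  | cons x t ih =>
      intro i s
      simp only [pvLastIdx]
      rcases ih (i+1) (if i < m ∧ pvIsDiff x = true then (i:Int) else s) with h | h
      · rw [h]; split_ifs with hc
        · right; simp
        · left; rfl
      · right; omega

theorem pvLastIdx_lt (m : Nat) (xs : List String) : ∀ (i : Nat) (s : Int), pvLastIdx m s i xs = s ∨ pvLastIdx m s i xs < (m : Int) := by
  induction xs with
  | nil => intro i s; left; rfl
  | cons x t ih =>
      intro i s
      simp only [pvLastIdx]
      rcases ih (i+1) (if i < m ∧ pvIsDiff x = true then (i:Int) else s) with h | h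
      · rw [h]; split_ifs with hc
        · right; exact_mod_cast hc.1
        · left; rfl
      · right; exact h

theorem pvLastIdx_max (m : Nat) (xs : List String) : ∀ (i k : Nat) (s : Int), pvLastIdx m s i xs < ((i + k : Nat) : Int) → i + k < m → k < xs.length → pvIsDiff (xs.getD k "") = false := by
  induction xs with
  | nil => intro i k s _ _ h3; simp at h3
  | cons x t ih =>
      intro i k s h1 h2 h3
      match k with
      | 0 =>
        simp only [List.getD_cons_zero]
        by_contra hP
        simp only [Bool.not_eq_false] at hP
        simp only [pvLastIdx, if_pos (⟨by omega, hP⟩ : i < m ∧ pvIsDiff x = true)] at h1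
        rcases pvLastIdx_cases m t (i+1) (i:Int) with h | h
        · omega
        · omega
      | k+1 =>
        simp only [List.getD_cons_succ]
        refine ih (i+1) k (if i < m ∧ pvIsDiff x = true then (i:Int) else s) ?_ (by omega) (by simpa using h3)
        simp only [pvLastIdx] at h1
        have : ((i+1) + k : Nat) = (i + (k+1) : Nat) := by omega
        rw [this]; exact h1

theorem pvLastIdx_succ (m : Nat) (xs : List String) : ∀ (i : Nat) (s : Int), pvLastIdx (m + 1) s i xs = if m < i + xs.length ∧ i ≤ m ∧ pvIsDiff (xs.getD (m - i) "") then (m : Int) else pvLastIdx m s i xs := by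
  induction xs with
  | nil =>
      intro i s
      simp only [pvLastIdx]
      rw [if_neg (by simp; omega)]
  | cons x t ih =>
      intro i s
      rcases Nat.lt_trichotomy i m with hi | hi | hi
      · -- i < m
        have hs' : (if i < m + 1 ∧ pvIsDiff x = true then (i:Int) else s)
                 = (if i < m ∧ pvIsDiff x = true then (i:Int) else s) := by
          by_cases hP : pvIsDiff x = true
          · rw [if_pos ⟨by omega, hP⟩, if_pos ⟨hi, hP⟩]
          · rw [if_neg (by tauto), if_neg (by tauto)]
        have hg : (x :: t).getD (m - i) "" = t.getD (m - (i+1)) "" := by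
          rw [show m - i = (m - (i+1)) + 1 from by omega, List.getD_cons_succ]
        simp only [pvLastIdx, hs', List.length_cons, hg]
        rw [ih (i+1)]
        exact if_congr (by
          constructor
          · rintro ⟨h1, h2, h3⟩; exact ⟨by omega, by omega, h3⟩
          · rintro ⟨h1, h2, h3⟩; exact ⟨by omega, by omega, h3⟩) rfl rfl
      · -- i = m
        subst hi
        simp only [pvLastIdx, List.length_cons, Nat.sub_self, List.getD_cons_zero]
        rw [pvLastIdx_frozen (i+1) t (i+1) _ (by omega), pvLastIdx_frozen i t (i+1) _ (by omega)]
        by_cases hP : pvIsDiff x = true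
        · rw [if_pos ⟨by omega, hP⟩, if_pos ⟨by omega, by omega, hP⟩]
        · rw [if_neg (fun h => hP h.2), if_neg (fun h => hP h.2.2),
              if_neg (fun h => absurd h.1 (by omega))]
      · -- m < i
        have h1 : (if i < m + 1 ∧ pvIsDiff x = true then (i:Int) else s) = s :=
          if_neg (fun h => absurd h.1 (by omega))
        have h2 : (if i < m ∧ pvIsDiff x = true then (i:Int) else s) = s :=
          if_neg (fun h => absurd h.1 (by omega))
        simp only [pvLastIdx, List.length_cons, h1, h2]
        rw [pvLastIdx_frozen (m+1) t (i+1) s (by omega), pvLastIdx_frozen m t (i+1) s (by omega),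
            if_neg (fun h => absurd h.2.1 (by omega))]

-- A's backward loop keeps a found (nonnegative) accumulator
theorem pvKeepA (xs : List String) (l : List Int) (acc : Int) (h : 0 ≤ acc) :
    l.foldl (fun acc i => if 0 ≤ acc then acc else if pvIsDiff (PySem.List.pyGetD xs i "") then i else acc) acc = acc := by
  induction l generalizing acc with
  | nil => rfl
  | cons y l ih => simp only [List.foldl_cons, if_pos h]; exact ih acc h

-- A's forward loop keeps an accumulator < len
theorem pvKeepE (xs : List String) (l : List Int) (acc : Int) (h : acc < (xs.length : Int)) :
    l.foldl (fun acc j => if acc < (xs.length : Int) then acc else if pvIsDiff (PySem.List.pyGetD xs j "") then j else acc) acc = acc := by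
  induction l generalizing acc with
  | nil => rfl
  | cons y l ih => simp only [List.foldl_cons, if_pos h]; exact ih acc h

-- A's backward scan computes pvLastIdx
theorem pvA1 (xs : List String) (m : Nat) (hm : m ≤ xs.length) :
    (PySem.List.pyRange ((m : Int) - 1) (-1) (-1)).foldl
      (fun acc i => if 0 ≤ acc then acc else if pvIsDiff (PySem.List.pyGetD xs i "") then i else acc) (-1)
    = pvLastIdx m (-1) 0 xs := by
  induction m with
  | zero =>
      rw [show ((0:Nat):Int) - 1 = -1 from by norm_num,
          PySem.List.pyRange_neg_one_eq_nil (by omega)]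
      simp only [List.foldl_nil]
      exact (pvLastIdx_frozen 0 xs 0 (-1) (by omega)).symm
  | succ m ih =>
      have h1 : ((m+1:Nat):Int) - 1 = (m:Int) := by push_cast; ring
      rw [h1, PySem.List.pyRange_neg_one_cons (by omega)]
      simp only [List.foldl_cons]
      rw [if_neg (by omega)]
      rw [show PySem.List.pyGetD xs (m:Int) ("":String) = xs.getD m "" from
            PySem.List.pyGetD_natCast xs m ""]
      rw [pvLastIdx_succ m xs 0 (-1)]
      by_cases hP : pvIsDiff (xs.getD m "") = true
      · rw [if_pos hP, pvKeepA xs _ (m:Int) (by omega), if_pos ⟨by omega, by omega, hP⟩]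
      · rw [if_neg hP, if_neg (fun h => hP h.2.2)]
        exact ih (by omega)

-- A's forward scan from t computes pvFF
theorem pvA2 (xs : List String) (t : Nat) :
    (PySem.List.pyRange (t : Int) (xs.length : Int) 1).foldl
      (fun acc j => if acc < (xs.length : Int) then acc else if pvIsDiff (PySem.List.pyGetD xs j "") then j else acc)
      (xs.length : Int)
    = pvFF xs t (xs.length : Int) := by
  have key : ∀ (d t : Nat), xs.length - t ≤ d →
      (PySem.List.pyRange (t : Int) (xs.length : Int) 1).foldl
        (fun acc j => if acc < (xs.length : Int) then acc else if pvIsDiff (PySem.List.pyGetD xs j "") then j else acc)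
        (xs.length : Int)
      = pvFF xs t (xs.length : Int) := by
    intro d
    induction d with
    | zero =>
        intro t ht
        rw [PySem.List.pyRange_one_eq_nil (by omega)]
        simp only [List.foldl_nil, pvFF, List.drop_eq_nil_of_le (by omega : xs.length ≤ t),
          List.findIdx?_nil]
    | succ d ih =>
        intro t ht
        by_cases hlt : t < xs.length
        · rw [PySem.List.pyRange_one_cons (by omega)]
          simp only [List.foldl_cons]
          rw [if_neg (by omega)]
          rw [show PySem.List.pyGetD xs (t:Int) ("":String) = xs.getD t "" from
                PySem.List.pyGetD_natCast xs t ""]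
          have hdrop : xs.drop t = xs.getD t "" :: xs.drop (t+1) := by
            rw [List.getD_eq_getElem xs "" hlt]
            exact List.drop_eq_getElem_cons hlt
          by_cases hP : pvIsDiff (xs.getD t "") = true
          · rw [if_pos hP, pvKeepE xs _ (t:Int) (by exact_mod_cast hlt)]
            simp only [pvFF, hdrop, List.findIdx?_cons, hP]
            norm_num
          · rw [if_neg hP]
            rw [show (t:Int) + 1 = ((t+1:Nat):Int) from by push_cast; ring]
            rw [ih (t+1) (by omega)]
            simp only [pvFF, hdrop, List.findIdx?_cons, hP]
            cases hfi : (xs.drop (t+1)).findIdx? pvIsDiff with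
            | none => simp
            | some k => simp; omega
        · rw [PySem.List.pyRange_one_eq_nil (by omega)]
          simp only [List.foldl_nil, pvFF, List.drop_eq_nil_of_le (by omega : xs.length ≤ t),
            List.findIdx?_nil]
  exact key xs.length t (by omega)

theorem pvFI_high (m : Nat) (xs : List String) : ∀ (i : Nat) (e : Int), m ≤ i → pvFirstIdx m e i xs = (match xs.findIdx? pvIsDiff with | some k => ((i + k : Nat) : Int) | none => e) := by
  induction xs with
  | nil => intro i e _; rfl
  | cons x t ih =>
      intro i e h
      simp only [pvFirstIdx, List.findIdx?_cons]
      by_cases hP : pvIsDiff x = true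
      · rw [if_pos ⟨h, hP⟩]; simp [hP]
      · rw [if_neg (fun hc => hP hc.2), ih (i+1) e (by omega)]
        simp only [hP]
        cases hfi : t.findIdx? pvIsDiff with
        | none => simp
        | some k => simp; ring

theorem pvFI_low (m : Nat) (xs : List String) : ∀ (i : Nat) (e : Int), i ≤ m → pvFirstIdx m e i xs = (match (xs.drop (m - i)).findIdx? pvIsDiff with | some k => ((m + k : Nat) : Int) | none => e) := by
  induction xs with
  | nil => intro i e _; simp [pvFirstIdx]
  | cons x t ih =>
      intro i e h
      rcases Nat.eq_or_lt_of_le h with hi | hi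
      · -- i = m
        subst hi
        simp only [pvFirstIdx, Nat.sub_self, List.drop_zero, List.findIdx?_cons]
        by_cases hP : pvIsDiff x = true
        · rw [if_pos ⟨le_refl i, hP⟩]; simp [hP]
        · rw [if_neg (fun hc => hP hc.2), pvFI_high i t (i+1) e (by omega)]
          simp only [hP]
          cases hfi : t.findIdx? pvIsDiff with
          | none => simp
          | some k => simp; ring
      · -- i < m
        simp only [pvFirstIdx]
        rw [if_neg (fun hc => absurd hc.1 (by omega)), ih (i+1) e (by omega),
            show m - i = (m - (i+1)) + 1 from by omega, List.drop_succ_cons]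

theorem pvFF_step (xs : List String) (t : Nat) (e : Int) (h : ¬(t < xs.length ∧ pvIsDiff (xs.getD t "") = true)) :
    pvFF xs t e = pvFF xs (t + 1) e := by
  by_cases hlt : t < xs.length
  · have hP : pvIsDiff (xs.getD t "") = false := by
      rcases Bool.eq_false_or_eq_true (pvIsDiff (xs.getD t "")) with hb | hb
      · exact absurd ⟨hlt, hb⟩ h
      · exact hb
    have hdrop : xs.drop t = xs.getD t "" :: xs.drop (t+1) := by
      rw [List.getD_eq_getElem xs "" hlt]
      exact List.drop_eq_getElem_cons hlt
    simp only [pvFF, hdrop, List.findIdx?_cons, hP]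
    cases hfi : (xs.drop (t+1)).findIdx? pvIsDiff with
    | none => simp
    | some k => simp; omega
  · simp only [pvFF, List.drop_eq_nil_of_le (by omega : xs.length ≤ t),
      List.drop_eq_nil_of_le (by omega : xs.length ≤ t + 1), List.findIdx?_nil]

theorem pvGlue (xs : List String) (m : Nat) (e : Int) : ∀ (t : Nat), t ≤ m → (∀ j, t ≤ j → j < m → j < xs.length → pvIsDiff (xs.getD j "") = false) → pvFF xs t e = pvFF xs m e := by
  intro t
  have key : ∀ (d t : Nat), m - t ≤ d → t ≤ m →
      (∀ j, t ≤ j → j < m → j < xs.length → pvIsDiff (xs.getD j "") = false) →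
      pvFF xs t e = pvFF xs m e := by
    intro d
    induction d with
    | zero => intro t h1 h2 _; rw [show t = m from by omega]
    | succ d ih =>
        intro t h1 h2 hno
        rcases Nat.eq_or_lt_of_le h2 with he | hlt
        · rw [he]
        · rw [pvFF_step xs t e (by
            rintro ⟨hl, hP⟩
            rw [hno t (le_refl t) hlt hl] at hP
            exact Bool.false_ne_true hP)]
          exact ih (t+1) (by omega) (by omega) (fun j hj1 hj2 hj3 => hno j (by omega) hj2 hj3)
  exact fun h1 h2 => key (m - t) t (le_refl _) h1 h2

-- B's fold freezes once done
theorem pvBdone (n : Int) (l : List (Int × String)) (st : Int × Int × Bool) (h : st.2.2 = true) :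
    l.foldl (fun (st : Int × Int × Bool) p => if st.2.2 then st else if pvIsDiff p.2 then (if p.1 ≤ n - 1 then (p.1, st.2.1, false) else (st.1, p.1, true)) else st) st = st := by
  induction l generalizing st with
  | nil => rfl
  | cons p l ih => simp only [List.foldl_cons, if_pos h]; exact ih st h

-- B's single pass computes (pvLastIdx, pvFirstIdx, pvDoneF)
theorem pvB1 (m : Nat) (xs : List String) : ∀ (i : Nat) (s e : Int),
    (PySem.List.enumerate xs (i : Int)).foldl
      (fun (st : Int × Int × Bool) p => if st.2.2 then st else if pvIsDiff p.2 then (if p.1 ≤ (m : Int) - 1 then (p.1, st.2.1, false) else (st.1, p.1, true)) else st)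
      (s, e, false)
    = (pvLastIdx m s i xs, pvFirstIdx m e i xs, pvDoneF m i xs) := by
  induction xs with
  | nil => intro i s e; rfl
  | cons x t ih =>
      intro i s e
      rw [PySem.List.enumerate_cons]
      simp only [List.foldl_cons, pvLastIdx, pvFirstIdx, pvDoneF]
      have hcast : (i : Int) + 1 = ((i + 1 : Nat) : Int) := by push_cast; ring
      by_cases hP : pvIsDiff x = true
      · by_cases hi : i < m
        · have h1 : (i : Int) ≤ (m : Int) - 1 := by omega
          simp only [hP, and_true, Bool.false_eq_true, if_false, if_true, if_pos h1,
            if_pos hi, if_neg (show ¬ m ≤ i from by omega)]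
          rw [hcast]
          exact ih (i + 1) (i : Int) e
        · have h1 : ¬((i : Int) ≤ (m : Int) - 1) := by omega
          simp only [hP, and_true, Bool.false_eq_true, if_false, if_true, if_neg h1,
            if_neg (show ¬ i < m from by omega), if_pos (show m ≤ i from by omega)]
          rw [pvBdone ((m : Int)) _ _ rfl, pvLastIdx_frozen m t (i + 1) s (by omega)]
      · have hPf : pvIsDiff x = false := by
          rcases Bool.eq_false_or_eq_true (pvIsDiff x) with hb | hb
          · exact absurd hb hP
          · exact hb
        simp only [hPf, Bool.false_eq_true, and_false, if_false]
        rw [hcast]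
        exact ih (i + 1) s e

theorem pvFF_cast (xs : List String) (t : Nat) (ht : t ≤ xs.length) :
    ∃ e0 : Nat, pvFF xs t (xs.length : Int) = (e0 : Int) ∧ t ≤ e0 ∧ e0 ≤ xs.length := by
  unfold pvFF
  cases hfi : (xs.drop t).findIdx? pvIsDiff with
  | none => exact ⟨xs.length, rfl, ht, le_refl _⟩
  | some k =>
      have hk : k < (xs.drop t).length := (List.findIdx?_eq_some_iff_findIdx_eq.mp hfi).1
      rw [List.length_drop] at hk
      exact ⟨t + k, rfl, by omega, by omega⟩

-- ===== VERDICT (by name: the statement is the Claim_ definition above) =====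
theorem extract_diff_block_for_line_py_spec : Claim_equal_extract_diff_block_for_line_py := by
  intro patch_text line_no _
  unfold Spec_extract_diff_block_for_line_py
  simp only [extract_diff_block_for_line_py, extract_diff_block_for_line_py_alt]
  by_cases hnil : PySem.Str.splitlines patch_text = []
  · rw [if_pos hnil, if_pos hnil]
  · rw [if_neg hnil, if_neg hnil]
    by_cases h0 : line_no ≤ 0
    · rw [if_pos h0, if_pos h0]
    · rw [if_neg h0, if_neg h0]
      set xs := PySem.Str.splitlines patch_text with hxs
      have hlen : 0 < xs.length := List.length_pos_of_ne_nil hnil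
      set nA : Int := if line_no > (xs.length : Int) then (xs.length : Int) else line_no with hnA
      have hmin : min line_no (xs.length : Int) = nA := by
        rw [hnA]; split_ifs with h <;> omega
      rw [hmin]
      have hnpos : 1 ≤ nA := by rw [hnA]; split_ifs with h <;> omega
      have hnle : nA ≤ (xs.length : Int) := by rw [hnA]; split_ifs with h <;> omega
      set m : Nat := nA.toNat with hm
      have hmc : (m : Int) = nA := by omega
      have hm1 : 1 ≤ m := by omega
      have hmle : m ≤ xs.length := by omega
      rw [← hmc, pvA1 xs m hmle]
      have hb1 := pvB1 m xs 0 (-1) (xs.length : Int)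
      rw [Nat.cast_zero] at hb1
      rw [hb1]
      set sv : Int := pvLastIdx m (-1) 0 xs with hsv
      by_cases hs : sv < 0
      · rw [if_pos hs, if_pos hs]
      · rw [if_neg hs, if_neg hs]
        have hslt : sv < (m : Int) := by
          rcases pvLastIdx_lt m xs 0 (-1) with h | h
          · rw [← hsv] at h; omega
          · rw [← hsv] at h; exact h
        set s0 : Nat := sv.toNat with hs0
        have hsc : ((s0 : Nat) : Int) = sv := by omega
        rw [show sv + 1 = ((s0 + 1 : Nat) : Int) from by omega, pvA2 xs (s0 + 1)]
        have hfirst : pvFirstIdx m (xs.length : Int) 0 xs = pvFF xs (s0 + 1) (xs.length : Int) := by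
          rw [pvFI_low m xs 0 (xs.length : Int) (by omega), Nat.sub_zero]
          rw [show (match (xs.drop m).findIdx? pvIsDiff with
                    | some k => ((m + k : Nat) : Int)
                    | none => (xs.length : Int)) = pvFF xs m (xs.length : Int) from rfl]
          refine (pvGlue xs m (xs.length : Int) (s0 + 1) (by omega) ?_).symm
          intro j hj1 hj2 hj3
          refine pvLastIdx_max m xs 0 j (-1) ?_ (by omega) hj3
          rw [← hsv]
          push_cast
          omega
        rw [hfirst]
        obtain ⟨e0, he0, he1, he2⟩ := pvFF_cast xs (s0 + 1) (by omega)
        have hblock : PySem.List.slice xs (some sv) (some (pvFF xs (s0 + 1) (xs.length : Int))) ≠ [] := by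
          intro hb
          have hl := congrArg List.length hb
          rw [PySem.List.length_slice] at hl
          rw [he0, ← hsc] at hl
          rw [PySem.List.clampIdx_natCast, PySem.List.clampIdx_natCast] at hl
          simp only [List.length_nil] at hl
          omega
        rw [if_neg hblock]
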